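-- pv_equiv track=rewrite | github.com/Nauss/AdventOfCode | 2024/Day 19/main.py | part1
-- ===== SOURCE A (Python) =====
-- def getNextTowels(currents, towels, design):
--     maxTowelsLen = max([len(x) for x in towels])
--     nexts = set()
--     maxLen = 0
--     for current in currents:
--         dIndex = current
--         size = min(maxTowelsLen, len(design) - dIndex)
--         while True:
--             if size == 0:
--                 break
--             if design[dIndex : dIndex + size] in towels:
--                 next = current + size
--                 if not design[0 : current + size] in towels:
--                     towels.add(design[0 : current + size])
--                 if next > maxLen:
--                     maxLen = next
--                 nexts.add(next)
--             size -= 1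
--     return nexts, maxLen
--
-- def part1(towels, designs):
--     possible = 0
--     for design in designs:
--         currents = set([0])
--         while True:
--             nexts, maxLen = getNextTowels(currents, towels, design)
--             if len(nexts) == 0:
--                 break
--             if maxLen == len(design):
--                 # Found
--                 possible += 1
--                 break
--             currents = nexts
--     return possible
-- ===== SOURCE B (Python) =====
-- def part1(towels, designs):
--     towelset = set(towels)
--     lens = {len(t) for t in towelset if t}
--     count = 0
--     for d in designs:
--         n = len(d)
--         dp = [False]  # dp[i]: d[:i] is a concatenation of one or more towels
--         for i in range(1, n + 1):
--             dp.append(any(l <= i and (dp[i - l] or l == i) and d[i - l:i] in towelset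
--                           for l in lens))
--         count += dp[n]
--     return count
-- ===== Notes on version B (the rewrite author's own statement) =====
-- stated objective: faster
-- what changed: Replaces A's round-by-round frontier-set search, which rescans every substring window per frontier position and keeps growing the towel set with composite prefixes, by a single left-to-right DP over prefix lengths that only probes the distinct towel lengths against a fixed towel set.
import Mathlib
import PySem

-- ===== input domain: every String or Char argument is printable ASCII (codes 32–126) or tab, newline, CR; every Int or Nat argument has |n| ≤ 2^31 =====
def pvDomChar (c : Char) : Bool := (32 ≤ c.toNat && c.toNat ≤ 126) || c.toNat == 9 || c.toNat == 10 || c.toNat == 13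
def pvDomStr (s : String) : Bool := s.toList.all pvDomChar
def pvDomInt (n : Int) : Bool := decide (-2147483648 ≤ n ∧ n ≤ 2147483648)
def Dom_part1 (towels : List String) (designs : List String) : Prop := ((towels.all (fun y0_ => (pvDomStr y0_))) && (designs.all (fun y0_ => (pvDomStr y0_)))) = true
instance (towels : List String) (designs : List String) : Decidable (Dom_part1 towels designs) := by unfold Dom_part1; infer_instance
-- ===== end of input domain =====

-- B replaces A's frontier-set search (with its growing towel set) by a plain prefix DP over the
-- distinct towel lengths; equivalence of the returned count is proved on Pre_part1.
-- (A mutates its towel-set argument in place; the equivalence proved here is about the return value only.)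

-- ===== PORT A =====
-- inner 'while True' of getNextTowels: size counts down from s0 to 1; state (towels, nexts, maxLen)
def pvInner (d : String) (current : Int) :
    Nat → List String → PySem.Set Int → Int → List String × PySem.Set Int × Int
  | 0, T, nexts, maxLen => (T, nexts, maxLen)
  | s+1, T, nexts, maxLen =>
    let size : Int := (s : Int) + 1
    if PySem.Str.slice d (some current) (some (current + size)) ∈ T then
      let nxt := current + size
      -- 'if not design[0:current+size] in towels: towels.add(...)' is exactly Set.add
      let T' := PySem.Set.add T (PySem.Str.slice d (some 0) (some nxt))
      let maxLen' := if maxLen < nxt then nxt else maxLen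
      pvInner d current s T' (PySem.Set.add nexts nxt) maxLen'
    else
      pvInner d current s T nexts maxLen

-- getNextTowels: Python mutates 'towels', so the port also returns the updated towel set.
-- max([len(x) for x in towels]) raises ValueError on an empty set: that input is outside Pre_part1
-- and the port uses .getD 0 there.
def pvGetNextTowels (currents : PySem.Set Int) (T : List String) (d : String) :
    List String × PySem.Set Int × Int :=
  let maxTowelsLen := (PySem.List.max? (T.map PySem.Str.len) id).getD 0
  currents.foldl
    (fun st current =>
      pvInner d current (min maxTowelsLen (PySem.Str.len d - current)).toNat st.1 st.2.1 st.2.2)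
    (T, PySem.Set.empty, 0)

-- the 'while True' of part1 for one design; each round the least frontier position strictly
-- increases, so len(design)+1 rounds of fuel are never exhausted (proved below)
def pvDesignLoop (d : String) : Nat → List String → PySem.Set Int → Bool × List String
  | 0, T, _ => (false, T)
  | fuel+1, T, currents =>
    let r := pvGetNextTowels currents T d
    if PySem.Set.len r.2.1 = 0 then (false, r.1)
    else if r.2.2 = PySem.Str.len d then (true, r.1)
    else pvDesignLoop d fuel r.1 r.2.1

def part1 (towels : List String) (designs : List String) : Int :=
  (designs.foldl
    (fun (st : Int × List String) d =>
      let r := pvDesignLoop d ((PySem.Str.len d).toNat + 1) st.2 (PySem.Set.ofList [(0 : Int)])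
      (st.1 + (if r.1 then 1 else 0), r.2))
    (0, PySem.Set.ofList towels)).1

-- ===== PORT B =====
def part1_alt (towels : List String) (designs : List String) : Int :=
  let towelset := PySem.Set.ofList towels
  let lens : PySem.Set Int :=
    PySem.Set.ofList ((towelset.filter (fun t => decide (t ≠ ""))).map PySem.Str.len)
  designs.foldl
    (fun count d =>
      let n := PySem.Str.len d
      let dp :=
        (PySem.List.pyRange 1 (n + 1) 1).foldl
          (fun dp i =>
            dp ++ [lens.any (fun l =>
              decide (l ≤ i) &&
                (PySem.List.pyGetD dp (i - l) false || decide (l = i)) &&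
                decide (PySem.Str.slice d (some (i - l)) (some i) ∈ towelset))])
          [false]
      count + (if PySem.List.pyGetD dp n false then 1 else 0))
    0

-- ===== PRECONDITION & SPEC =====
-- Pre_part1 excludes exactly the inputs where Python A raises: with a nonempty design list and an
-- empty towel set, max([len(x) for x in towels]) raises ValueError.
def Pre_part1 (towels : List String) (designs : List String) : Prop :=
  designs = [] ∨ towels ≠ []
instance (towels : List String) (designs : List String) : Decidable (Pre_part1 towels designs) := by
  unfold Pre_part1; infer_instance

def pvWitness_part1 : List String × List String := (["r", "gb"], ["rgb", "x"])

def Spec_part1 (towels : List String) (designs : List String) (out : Int) : Prop :=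
  out = part1_alt towels designs
instance (towels : List String) (designs : List String) (out : Int) : Decidable (Spec_part1 towels designs out) := by
  unfold Spec_part1; infer_instance

-- ===== CLAIM (what is proved, stated in full; the proofs are below) =====
def Claim_equal_part1 : Prop := ∀ (towels : List String) (designs : List String),
  Dom_part1 towels designs → Pre_part1 towels designs → Spec_part1 towels designs (part1 towels designs)

-- ===== LEMMAS AND PROOFS =====

theorem setLen_eq_zero_iff (N : PySem.Set Int) : PySem.Set.len N = 0 ↔ N = [] := by
  cases N
  · simp [PySem.Set.len]
  · simp [PySem.Set.len]
    omega

-- 'cs is a concatenation of one or more nonempty towels of T0'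
def CompPos (T0 : List String) (cs : List Char) : Prop :=
  ∃ parts : List String, parts ≠ [] ∧ (∀ p ∈ parts, p ∈ T0 ∧ p ≠ "") ∧
    (parts.map String.toList).flatten = cs

-- invariant of A's evolving towel set: contains the originals, and every member is "" or composite
def TInv (T0 T : List String) : Prop :=
  (∀ t ∈ T0, t ∈ T) ∧ ∀ t ∈ T, t = "" ∨ CompPos T0 t.toList

theorem compPos_nil_false (T0 : List String) : ¬ CompPos T0 [] := by
  rintro ⟨parts, hne, hmem, hfl⟩
  rcases parts with _ | ⟨p, ps⟩
  · exact hne rfl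
  · have hp := hmem p (by simp)
    have hfl' : p.toList ++ ((ps.map String.toList).flatten) = [] := by simpa using hfl
    have : p.toList = [] := by
      rcases List.append_eq_nil_iff.mp hfl' with ⟨h1, _⟩
      exact h1
    exact hp.2 (String.toList_inj.mp (by simpa using this))

theorem compPos_append {T0 : List String} {a b : List Char} :
    CompPos T0 a → CompPos T0 b → CompPos T0 (a ++ b) := by
  rintro ⟨pa, ha, hma, hfa⟩ ⟨pb, hb, hmb, hfb⟩
  refine ⟨pa ++ pb, by simp [ha], ?_, ?_⟩
  · intro p hp; rcases List.mem_append.mp hp with h | h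
    exacts [hma p h, hmb p h]
  · simp [List.flatten_append, hfa, hfb]

theorem compPos_single {T0 : List String} {p : String} (hp : p ∈ T0) (hne : p ≠ "") :
    CompPos T0 p.toList :=
  ⟨[p], by simp, by simp [hp, hne], by simp⟩

theorem toList_ne_nil_of_ne_empty {s : String} (h : s ≠ "") : s.toList ≠ [] := by
  intro hl; exact h (String.toList_inj.mp (by simpa using hl))

theorem one_le_len_of_ne_empty {s : String} (h : s ≠ "") : 1 ≤ PySem.Str.len s := by
  have := toList_ne_nil_of_ne_empty h
  rw [PySem.Str.len_eq]
  have : 0 < s.toList.length := List.length_pos_of_ne_nil this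
  omega

theorem strSlice_toList (d : String) (a b : Int) :
    (PySem.Str.slice d (some a) (some b)).toList = PySem.List.slice d.toList (some a) (some b) := by
  simp [PySem.Str.slice]

theorem slice_toList (d : String) (c size : Int) (hc : 0 ≤ c) (hs : 0 ≤ size) :
    (PySem.Str.slice d (some c) (some (c + size))).toList =
      (d.toList.drop c.toNat).take size.toNat := by
  rw [strSlice_toList, PySem.List.slice_toNat _ hc (by omega)]
  congr 1
  omega

theorem slice_toList' (d : String) (a b : Int) (ha : 0 ≤ a) (hab : a ≤ b) :
    (PySem.Str.slice d (some a) (some b)).toList =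
      (d.toList.drop a.toNat).take (b - a).toNat := by
  rw [strSlice_toList, PySem.List.slice_toNat _ ha (by omega)]
  congr 1
  omega

theorem prefix_toList (d : String) (b : Int) (hb : 0 ≤ b) :
    (PySem.Str.slice d (some 0) (some b)).toList = d.toList.take b.toNat := by
  rw [strSlice_toList, PySem.List.slice_toNat _ le_rfl hb]
  simp

theorem foldl_ne_none {α β : Type} {f : Option β → α → Option β}
    (hf : ∀ acc x, f acc x ≠ none) :
    ∀ (l : List α) (acc : Option β), acc ≠ none ∨ l ≠ [] → List.foldl f acc l ≠ none := by
  intro l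
  induction l with
  | nil => intro acc h; rcases h with h | h; exacts [h, absurd rfl h]
  | cons x xs ih =>
    intro acc _
    simp only [List.foldl_cons]
    exact ih (f acc x) (Or.inl (hf acc x))

theorem max?_some_of_mem {xs : List Int} {x : Int} (h : x ∈ xs) :
    ∃ m, PySem.List.max? xs id = some m ∧ x ≤ m := by
  have hne : xs ≠ [] := List.ne_nil_of_mem h
  have h2 : PySem.List.max? xs id ≠ none := by
    unfold PySem.List.max?
    exact foldl_ne_none (by intro acc x; cases acc <;> (simp; try split) <;> simp) xs none (Or.inr hne)
  obtain ⟨m, hm⟩ := Option.ne_none_iff_exists'.mp h2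
  exact ⟨m, hm, PySem.List.max?_isMax hm x h⟩

theorem len_le_maxT {T : List String} {t : String} (h : t ∈ T) :
    PySem.Str.len t ≤ (PySem.List.max? (T.map PySem.Str.len) id).getD 0 := by
  obtain ⟨m, hm, hle⟩ := max?_some_of_mem (List.mem_map_of_mem h (f := PySem.Str.len))
  rw [hm]; exact hle

theorem inner_spec (T0 : List String) (d : String) (c : Int)
    (hc : 0 ≤ c) (hcd : c = 0 ∨ CompPos T0 (d.toList.take c.toNat)) :
    ∀ (s : Nat) (T : List String) (N : PySem.Set Int) (m : Int),
    TInv T0 T →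
    (s : Int) ≤ PySem.Str.len d - c →
    (∀ j ∈ N, 0 < j ∧ j ≤ PySem.Str.len d ∧ CompPos T0 (d.toList.take j.toNat) ∧ j ≤ m) →
    (m = 0 ∨ m ∈ N) → 0 ≤ m →
    (∀ t ∈ T, t ∈ (pvInner d c s T N m).1) ∧
    TInv T0 (pvInner d c s T N m).1 ∧
    (∀ j ∈ (pvInner d c s T N m).2.1,
        (j ∈ N ∨ c < j) ∧ 0 < j ∧ j ≤ PySem.Str.len d ∧
        CompPos T0 (d.toList.take j.toNat) ∧ j ≤ (pvInner d c s T N m).2.2) ∧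
    ((pvInner d c s T N m).2.2 = 0 ∨ (pvInner d c s T N m).2.2 ∈ (pvInner d c s T N m).2.1) ∧
    0 ≤ (pvInner d c s T N m).2.2 ∧ m ≤ (pvInner d c s T N m).2.2 ∧
    (∀ j ∈ N, j ∈ (pvInner d c s T N m).2.1) ∧
    (∀ size : Int, 1 ≤ size → size ≤ (s : Int) →
        PySem.Str.slice d (some c) (some (c + size)) ∈ T → (c + size) ∈ (pvInner d c s T N m).2.1) := by
  intro s
  induction s with
  | zero =>
    intro T N m hT _ hN hm hm0
    simp only [pvInner]
    refine ⟨fun t ht => ht, hT, ?_, hm, hm0, le_rfl, fun j hj => hj, ?_⟩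
    · intro j hj
      obtain ⟨h1, h2, h3, h4⟩ := hN j hj
      exact ⟨Or.inl hj, h1, h2, h3, h4⟩
    · intro size h1 h2 _
      exfalso
      simp only [Nat.cast_zero] at h2
      omega
  | succ s ih =>
    intro T N m hT hs hN hm hm0
    have hlen : PySem.Str.len d = (d.toList.length : Int) := PySem.Str.len_eq d
    have hs1 : (s : Int) + 1 ≤ PySem.Str.len d - c := by push_cast at hs; omega
    simp only [pvInner]
    by_cases hmatch : PySem.Str.slice d (some c) (some (c + ((s : Int) + 1))) ∈ T
    · rw [if_pos hmatch]
      set size : Int := (s : Int) + 1 with hsizedef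
      set nxt : Int := c + size with hnxtdef
      have hsz0 : 0 ≤ size := by omega
      have hslice : (PySem.Str.slice d (some c) (some (c + size))).toList =
          (d.toList.drop c.toNat).take size.toNat := slice_toList d c size hc hsz0
      have hslen : ((d.toList.drop c.toNat).take size.toNat).length = size.toNat := by
        rw [List.length_take, List.length_drop]
        omega
      have hsne : PySem.Str.slice d (some c) (some (c + size)) ≠ "" := by
        intro he
        rw [he] at hslice
        have h0 : ("".toList).length = ((d.toList.drop c.toNat).take size.toNat).length :=
          congrArg List.length hslice
        rw [hslen] at h0
        simp at h0
        omega
      have hscomp : CompPos T0 ((d.toList.drop c.toNat).take size.toNat) := by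
        rcases hT.2 _ hmatch with h | h
        · exact absurd h hsne
        · rwa [hslice] at h
      have htake : CompPos T0 (d.toList.take nxt.toNat) := by
        have harith : nxt.toNat = c.toNat + size.toNat := by omega
        rw [harith, List.take_add]
        rcases hcd with h0 | hcomp
        · have : c.toNat = 0 := by omega
          rw [this] at hscomp ⊢
          simpa using hscomp
        · exact compPos_append hcomp hscomp
      have hpref : (PySem.Str.slice d (some 0) (some nxt)).toList = d.toList.take nxt.toNat :=
        prefix_toList d nxt (by omega)
      have hT' : TInv T0 (PySem.Set.add T (PySem.Str.slice d (some 0) (some nxt))) := by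
        constructor
        · intro t ht
          exact (PySem.Set.mem_add _ _ _).mpr (Or.inl (hT.1 t ht))
        · intro t ht
          rcases (PySem.Set.mem_add _ _ _).mp ht with h | h
          · exact hT.2 t h
          · subst h
            exact Or.inr (by rwa [hpref])
      have hmle : m ≤ (if m < nxt then nxt else m) := by split <;> omega
      have hN' : ∀ j ∈ PySem.Set.add N nxt, 0 < j ∧ j ≤ PySem.Str.len d ∧
          CompPos T0 (d.toList.take j.toNat) ∧ j ≤ (if m < nxt then nxt else m) := by
        intro j hj
        rcases (PySem.Set.mem_add _ _ _).mp hj with h | h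
        · obtain ⟨h1, h2, h3, h4⟩ := hN j h
          exact ⟨h1, h2, h3, le_trans h4 hmle⟩
        · subst h
          refine ⟨by omega, by omega, htake, by split <;> omega⟩
      have hm' : (if m < nxt then nxt else m) = 0 ∨
          (if m < nxt then nxt else m) ∈ PySem.Set.add N nxt := by
        split
        · exact Or.inr ((PySem.Set.mem_add _ _ _).mpr (Or.inr rfl))
        · rcases hm with h | h
          · exact Or.inl h
          · exact Or.inr ((PySem.Set.mem_add _ _ _).mpr (Or.inl h))
      obtain ⟨C1, C2, C3, C4, C5, C6, C7, C8⟩ :=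
        ih (PySem.Set.add T (PySem.Str.slice d (some 0) (some nxt)))
          (PySem.Set.add N nxt) (if m < nxt then nxt else m)
          hT' (by omega) hN' hm' (by omega)
      refine ⟨?_, C2, ?_, C4, C5, le_trans hmle C6, ?_, ?_⟩
      · intro t ht
        exact C1 t ((PySem.Set.mem_add _ _ _).mpr (Or.inl ht))
      · intro j hj
        obtain ⟨h0, h1, h2, h3, h4⟩ := C3 j hj
        refine ⟨?_, h1, h2, h3, h4⟩
        rcases h0 with h | h
        · rcases (PySem.Set.mem_add _ _ _).mp h with h' | h'
          · exact Or.inl h'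
          · subst h'; exact Or.inr (by omega)
        · exact Or.inr h
      · intro j hj
        exact C7 j ((PySem.Set.mem_add _ _ _).mpr (Or.inl hj))
      · intro sz hsz1 hsz2 hszmem
        by_cases hle : sz ≤ (s : Int)
        · exact C8 sz hsz1 hle ((PySem.Set.mem_add _ _ _).mpr (Or.inl hszmem))
        · have : sz = size := by push_cast at hsz2; omega
          subst this
          exact C7 nxt ((PySem.Set.mem_add _ _ _).mpr (Or.inr rfl))
    · rw [if_neg hmatch]
      obtain ⟨C1, C2, C3, C4, C5, C6, C7, C8⟩ := ih T N m hT (by omega) hN hm hm0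
      refine ⟨C1, C2, C3, C4, C5, C6, C7, ?_⟩
      intro sz hsz1 hsz2 hszmem
      by_cases hle : sz ≤ (s : Int)
      · exact C8 sz hsz1 hle hszmem
      · have : sz = (s : Int) + 1 := by push_cast at hsz2; omega
        subst this
        exact absurd hszmem hmatch

theorem roundAux (T0 Tb : List String) (d : String) (maxT : Int)
    (hmax : ∀ t ∈ Tb, PySem.Str.len t ≤ maxT) :
    ∀ (currents : List Int) (st : List String × PySem.Set Int × Int),
    (∀ c ∈ currents, 0 ≤ c ∧ c ≤ PySem.Str.len d ∧
      (c = 0 ∨ CompPos T0 (d.toList.take c.toNat))) →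
    TInv T0 st.1 → (∀ t ∈ Tb, t ∈ st.1) →
    (∀ j ∈ st.2.1, 0 < j ∧ j ≤ PySem.Str.len d ∧ CompPos T0 (d.toList.take j.toNat) ∧
      j ≤ st.2.2) →
    (st.2.2 = 0 ∨ st.2.2 ∈ st.2.1) → 0 ≤ st.2.2 →
    TInv T0 (currents.foldl (fun st current =>
        pvInner d current (min maxT (PySem.Str.len d - current)).toNat st.1 st.2.1 st.2.2) st).1 ∧
    (∀ t ∈ Tb, t ∈ (currents.foldl (fun st current =>
        pvInner d current (min maxT (PySem.Str.len d - current)).toNat st.1 st.2.1 st.2.2) st).1) ∧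
    (∀ j ∈ (currents.foldl (fun st current =>
        pvInner d current (min maxT (PySem.Str.len d - current)).toNat st.1 st.2.1 st.2.2) st).2.1,
      (j ∈ st.2.1 ∨ ∃ c ∈ currents, c < j) ∧ 0 < j ∧ j ≤ PySem.Str.len d ∧
      CompPos T0 (d.toList.take j.toNat) ∧ j ≤ (currents.foldl (fun st current =>
        pvInner d current (min maxT (PySem.Str.len d - current)).toNat st.1 st.2.1 st.2.2) st).2.2) ∧
    ((currents.foldl (fun st current =>
        pvInner d current (min maxT (PySem.Str.len d - current)).toNat st.1 st.2.1 st.2.2) st).2.2 = 0 ∨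
      (currents.foldl (fun st current =>
        pvInner d current (min maxT (PySem.Str.len d - current)).toNat st.1 st.2.1 st.2.2) st).2.2 ∈
      (currents.foldl (fun st current =>
        pvInner d current (min maxT (PySem.Str.len d - current)).toNat st.1 st.2.1 st.2.2) st).2.1) ∧
    0 ≤ (currents.foldl (fun st current =>
        pvInner d current (min maxT (PySem.Str.len d - current)).toNat st.1 st.2.1 st.2.2) st).2.2 ∧
    (∀ j ∈ st.2.1, j ∈ (currents.foldl (fun st current =>
        pvInner d current (min maxT (PySem.Str.len d - current)).toNat st.1 st.2.1 st.2.2) st).2.1) ∧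
    (∀ c ∈ currents, ∀ t ∈ Tb, t ≠ "" → c + PySem.Str.len t ≤ PySem.Str.len d →
        PySem.Str.slice d (some c) (some (c + PySem.Str.len t)) = t →
        (c + PySem.Str.len t) ∈ (currents.foldl (fun st current =>
          pvInner d current (min maxT (PySem.Str.len d - current)).toNat st.1 st.2.1 st.2.2) st).2.1) := by
  intro currents
  induction currents with
  | nil =>
    intro st hcur hT hTb hN hm hm0
    refine ⟨hT, hTb, ?_, hm, hm0, fun j hj => hj, by intro c hc; exact absurd hc (by simp)⟩
    intro j hj
    obtain ⟨h1, h2, h3, h4⟩ := hN j hj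
    exact ⟨Or.inl hj, h1, h2, h3, h4⟩
  | cons c cs ih =>
    intro st hcur hT hTb hN hm hm0
    obtain ⟨hc0, hcl, hcd⟩ := hcur c (by simp)
    have hs0 : ((min maxT (PySem.Str.len d - c)).toNat : Int) ≤ PySem.Str.len d - c := by omega
    obtain ⟨I1, I2, I3, I4, I5, I6, I7, I8⟩ :=
      inner_spec T0 d c hc0 hcd (min maxT (PySem.Str.len d - c)).toNat st.1 st.2.1 st.2.2
        hT hs0 hN hm hm0
    simp only [List.foldl_cons]
    obtain ⟨C1, C2, C3, C4, C5, C6, C7⟩ :=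
      ih (pvInner d c (min maxT (PySem.Str.len d - c)).toNat st.1 st.2.1 st.2.2)
        (fun c' hc' => hcur c' (by simp [hc']))
        I2 (fun t ht => I1 t (hTb t ht))
        (fun j hj => ((I3 j hj).2))
        I4 I5
    refine ⟨C1, C2, ?_, C4, C5, ?_, ?_⟩
    · intro j hj
      obtain ⟨h0, h1, h2, h3, h4⟩ := C3 j hj
      refine ⟨?_, h1, h2, h3, h4⟩
      rcases h0 with h | ⟨c', hc', hlt⟩
      · rcases (I3 j h).1 with h' | h'
        · exact Or.inl h'
        · exact Or.inr ⟨c, by simp, h'⟩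
      · exact Or.inr ⟨c', by simp [hc'], hlt⟩
    · intro j hj
      exact C6 j (I7 j hj)
    · intro c' hc' t ht htne hble hsl
      rcases List.mem_cons.mp hc' with rfl | hc'
      · have h1 : 1 ≤ PySem.Str.len t := one_le_len_of_ne_empty htne
        have h2 : PySem.Str.len t ≤ ((min maxT (PySem.Str.len d - c')).toNat : Int) := by
          have := hmax t ht
          omega
        have h3 : PySem.Str.slice d (some c') (some (c' + PySem.Str.len t)) ∈ st.1 := by
          rw [hsl]; exact hTb t ht
        exact C6 _ (I8 (PySem.Str.len t) h1 h2 h3)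
      · exact C7 c' hc' t ht htne hble hsl

theorem round_spec (T0 : List String) (d : String) (currents : PySem.Set Int) (T : List String)
    (hT : TInv T0 T)
    (hcur : ∀ c ∈ currents, 0 ≤ c ∧ c ≤ PySem.Str.len d ∧
      (c = 0 ∨ CompPos T0 (d.toList.take c.toNat))) :
    TInv T0 (pvGetNextTowels currents T d).1 ∧
    (∀ t ∈ T, t ∈ (pvGetNextTowels currents T d).1) ∧
    (∀ j ∈ (pvGetNextTowels currents T d).2.1,
        (∃ c ∈ currents, c < j) ∧ 0 < j ∧ j ≤ PySem.Str.len d ∧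
        CompPos T0 (d.toList.take j.toNat) ∧ j ≤ (pvGetNextTowels currents T d).2.2) ∧
    ((pvGetNextTowels currents T d).2.2 = 0 ∨
      (pvGetNextTowels currents T d).2.2 ∈ (pvGetNextTowels currents T d).2.1) ∧
    (∀ c ∈ currents, ∀ t ∈ T, t ≠ "" → c + PySem.Str.len t ≤ PySem.Str.len d →
        PySem.Str.slice d (some c) (some (c + PySem.Str.len t)) = t →
        (c + PySem.Str.len t) ∈ (pvGetNextTowels currents T d).2.1) := by
  have hmax : ∀ t ∈ T, PySem.Str.len t ≤ (PySem.List.max? (T.map PySem.Str.len) id).getD 0 :=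
    fun t ht => len_le_maxT ht
  obtain ⟨C1, C2, C3, C4, C5, C6, C7⟩ :=
    roundAux T0 T d ((PySem.List.max? (T.map PySem.Str.len) id).getD 0) hmax currents
      (T, PySem.Set.empty, 0) hcur hT (fun t ht => ht)
      (by intro j hj; simp [PySem.Set.empty] at hj) (Or.inl rfl) le_rfl
  refine ⟨C1, C2, ?_, C4, C7⟩
  intro j hj
  obtain ⟨h0, h1, h2, h3, h4⟩ := C3 j hj
  refine ⟨?_, h1, h2, h3, h4⟩
  rcases h0 with h | h
  · simp [PySem.Set.empty] at h
  · exact h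

theorem first_piece {T0 : List String} {d : String} {c : Int}
    (hc : 0 ≤ c) (hcl : c ≤ PySem.Str.len d)
    (h : CompPos T0 (d.toList.drop c.toNat)) :
    ∃ t1, t1 ∈ T0 ∧ t1 ≠ "" ∧ c + PySem.Str.len t1 ≤ PySem.Str.len d ∧
      PySem.Str.slice d (some c) (some (c + PySem.Str.len t1)) = t1 ∧
      (CompPos T0 (d.toList.drop (c + PySem.Str.len t1).toNat) ∨
        c + PySem.Str.len t1 = PySem.Str.len d) := by
  obtain ⟨parts, hne, hmem, hfl⟩ := h
  rcases parts with _ | ⟨t1, ps⟩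
  · exact absurd rfl hne
  obtain ⟨ht1, ht1ne⟩ := hmem t1 (by simp)
  have hfl' : t1.toList ++ ((ps.map String.toList).flatten) = d.toList.drop c.toNat := by
    simpa using hfl
  have hlen : PySem.Str.len d = (d.toList.length : Int) := PySem.Str.len_eq d
  have hlent1 : PySem.Str.len t1 = (t1.toList.length : Int) := PySem.Str.len_eq t1
  have hcl' : c ≤ (d.toList.length : Int) := by rw [← hlen]; exact hcl
  have hL1 : 0 < t1.toList.length := List.length_pos_of_ne_nil (toList_ne_nil_of_ne_empty ht1ne)
  have hdroplen : (d.toList.drop c.toNat).length = d.toList.length - c.toNat :=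
    List.length_drop
  have hsum : t1.toList.length + ((ps.map String.toList).flatten).length =
      d.toList.length - c.toNat := by
    have := congrArg List.length hfl'
    simpa [hdroplen] using this
  have hble : c + PySem.Str.len t1 ≤ PySem.Str.len d := by omega
  have hsl : PySem.Str.slice d (some c) (some (c + PySem.Str.len t1)) = t1 := by
    apply String.toList_inj.mp
    rw [slice_toList d c _ hc (by omega)]
    have : (PySem.Str.len t1).toNat = t1.toList.length := by omega
    rw [this, ← hfl']
    exact List.take_left
  refine ⟨t1, ht1, ht1ne, hble, hsl, ?_⟩
  rcases ps with _ | ⟨p, ps'⟩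
  · right
    simp only [List.map_nil, List.flatten_nil, List.length_nil, Nat.add_zero] at hsum
    rw [hlent1, hlen]
    omega
  · left
    refine ⟨p :: ps', by simp, fun q hq => hmem q (by simp [hq]), ?_⟩
    have harith : (c + PySem.Str.len t1).toNat = c.toNat + t1.toList.length := by omega
    rw [harith, ← List.drop_drop, ← hfl', List.drop_left]

theorem loop_spec (T0 : List String) (d : String) :
    ∀ (fuel : Nat) (T : List String) (currents : PySem.Set Int),
    TInv T0 T → currents ≠ [] →
    (∀ c ∈ currents, 0 ≤ c ∧ c ≤ PySem.Str.len d ∧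
      (c = 0 ∨ CompPos T0 (d.toList.take c.toNat)) ∧
      (PySem.Str.len d - c).toNat < fuel) →
    TInv T0 (pvDesignLoop d fuel T currents).2 ∧
    ((pvDesignLoop d fuel T currents).1 = true → CompPos T0 d.toList) ∧
    ((∃ c ∈ currents, CompPos T0 (d.toList.drop c.toNat)) →
      (pvDesignLoop d fuel T currents).1 = true) := by
  intro fuel
  induction fuel with
  | zero =>
    intro T currents hT hne hcur
    obtain ⟨c, hc⟩ := List.exists_mem_of_ne_nil _ hne
    have := (hcur c hc).2.2.2
    omega
  | succ fuel ih =>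
    intro T currents hT hne hcur
    have hlen : PySem.Str.len d = (d.toList.length : Int) := PySem.Str.len_eq d
    obtain ⟨R1, R2, R3, R4, R5⟩ := round_spec T0 d currents T hT
      (fun c hc => ⟨(hcur c hc).1, (hcur c hc).2.1, (hcur c hc).2.2.1⟩)
    simp only [pvDesignLoop]
    by_cases h0 : PySem.Set.len (pvGetNextTowels currents T d).2.1 = 0
    · rw [if_pos h0]
      have hNnil : (pvGetNextTowels currents T d).2.1 = [] := (setLen_eq_zero_iff _).mp h0
      refine ⟨R1, by intro h; exact absurd h (by simp), ?_⟩
      rintro ⟨c, hcm, hcomp⟩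
      exfalso
      obtain ⟨t1, ht1, ht1ne, hble, hsl, _⟩ :=
        first_piece (T0 := T0) (hcur c hcm).1 (hcur c hcm).2.1 hcomp
      have := R5 c hcm t1 (hT.1 t1 ht1) ht1ne hble hsl
      rw [hNnil] at this
      simp at this
    · rw [if_neg h0]
      have hNne : (pvGetNextTowels currents T d).2.1 ≠ [] := by
        intro h
        exact h0 ((setLen_eq_zero_iff _).mpr h)
      by_cases h1 : (pvGetNextTowels currents T d).2.2 = PySem.Str.len d
      · rw [if_pos h1]
        refine ⟨R1, ?_, fun _ => rfl⟩
        intro _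
        obtain ⟨j, hj⟩ := List.exists_mem_of_ne_nil _ hNne
        rcases R4 with hz | hmem
        · exfalso
          obtain ⟨hj1, hj2, _, hj4⟩ := R3 j hj
          omega
        · obtain ⟨_, _, _, hcmp, _⟩ := R3 _ hmem
          rw [h1, hlen, Int.toNat_natCast, List.take_length] at hcmp
          exact hcmp
      · rw [if_neg h1]
        have hnotlen : ∀ j ∈ (pvGetNextTowels currents T d).2.1, j ≠ PySem.Str.len d := by
          intro j hj hjeq
          obtain ⟨_, _, _, _, hj5⟩ := R3 j hj
          rcases R4 with hz | hmem
          · omega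
          · obtain ⟨_, _, hm2, _, _⟩ := R3 _ hmem
            omega
        have hcur' : ∀ j ∈ (pvGetNextTowels currents T d).2.1,
            0 ≤ j ∧ j ≤ PySem.Str.len d ∧ (j = 0 ∨ CompPos T0 (d.toList.take j.toNat)) ∧
            (PySem.Str.len d - j).toNat < fuel := by
          intro j hj
          obtain ⟨⟨c, hcm, hclt⟩, hj1, hj2, hj3, _⟩ := R3 j hj
          have hfc := (hcur c hcm).2.2.2
          exact ⟨by omega, hj2, Or.inr hj3, by omega⟩
        obtain ⟨L1, L2, L3⟩ := ih (pvGetNextTowels currents T d).1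
          (pvGetNextTowels currents T d).2.1 R1 hNne hcur'
        refine ⟨L1, L2, ?_⟩
        rintro ⟨c, hcm, hcomp⟩
        obtain ⟨t1, ht1, ht1ne, hble, hsl, hrest⟩ :=
          first_piece (T0 := T0) (hcur c hcm).1 (hcur c hcm).2.1 hcomp
        have hjN := R5 c hcm t1 (hT.1 t1 ht1) ht1ne hble hsl
        rcases hrest with hr | hr
        · exact L3 ⟨c + PySem.Str.len t1, hjN, hr⟩
        · exact absurd hr (hnotlen _ hjN)

theorem design_spec {T0 T : List String} (d : String) (h : TInv T0 T) :
    TInv T0 (pvDesignLoop d ((PySem.Str.len d).toNat + 1) T (PySem.Set.ofList [(0 : Int)])).2 ∧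
    ((pvDesignLoop d ((PySem.Str.len d).toNat + 1) T (PySem.Set.ofList [(0 : Int)])).1 = true ↔
      CompPos T0 d.toList) := by
  have hlen : PySem.Str.len d = (d.toList.length : Int) := PySem.Str.len_eq d
  have hofl : PySem.Set.ofList [(0 : Int)] = [(0 : Int)] := rfl
  have hcur0 : ∀ c ∈ PySem.Set.ofList [(0 : Int)], 0 ≤ c ∧ c ≤ PySem.Str.len d ∧
      (c = 0 ∨ CompPos T0 (d.toList.take c.toNat)) ∧
      (PySem.Str.len d - c).toNat < (PySem.Str.len d).toNat + 1 := by
    intro c hc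
    rw [hofl] at hc
    simp at hc
    subst hc
    refine ⟨le_rfl, by omega, Or.inl rfl, by omega⟩
  obtain ⟨L1, L2, L3⟩ := loop_spec T0 d ((PySem.Str.len d).toNat + 1) T
    (PySem.Set.ofList [(0 : Int)]) h (by rw [hofl]; simp) hcur0
  refine ⟨L1, ⟨L2, ?_⟩⟩
  intro hcomp
  exact L3 ⟨0, by rw [hofl]; simp, by simpa using hcomp⟩

theorem dp_spec (ts : List String) (lens : PySem.Set Int)
    (hlens : ∀ l : Int, l ∈ lens ↔ ∃ t ∈ ts, t ≠ "" ∧ PySem.Str.len t = l) (d : String) :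
    ∀ i : Nat, i ≤ d.toList.length →
    ((PySem.List.pyRange 1 ((i : Int) + 1) 1).foldl
        (fun dp j =>
          dp ++ [lens.any (fun l =>
            decide (l ≤ j) &&
              (PySem.List.pyGetD dp (j - l) false || decide (l = j)) &&
              decide (PySem.Str.slice d (some (j - l)) (some j) ∈ ts))])
        [false]).length = i + 1 ∧
    ∀ k : Nat, k ≤ i →
      (((PySem.List.pyRange 1 ((i : Int) + 1) 1).foldl
          (fun dp j =>
            dp ++ [lens.any (fun l =>
              decide (l ≤ j) &&
                (PySem.List.pyGetD dp (j - l) false || decide (l = j)) &&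
                decide (PySem.Str.slice d (some (j - l)) (some j) ∈ ts))])
          [false]).getD k false = true ↔ CompPos ts (d.toList.take k)) := by
  intro i
  induction i with
  | zero =>
    intro _
    have h0 : PySem.List.pyRange 1 (((0 : Nat) : Int) + 1) 1 = [] :=
      PySem.List.pyRange_one_eq_nil (by norm_num)
    rw [h0]
    refine ⟨rfl, ?_⟩
    intro k hk
    have : k = 0 := by omega
    subst this
    simp only [List.foldl_nil, List.getD, List.getElem?_cons_zero, Option.getD_some,
      List.take_zero]
    constructor
    · intro h; cases h
    · intro h; exact absurd h (compPos_nil_false ts)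
  | succ i ih =>
    intro hi
    obtain ⟨hlenP, hdpP⟩ := ih (by omega)
    have hsplit : PySem.List.pyRange 1 (((i + 1 : Nat) : Int) + 1) 1 =
        PySem.List.pyRange 1 (((i : Nat) : Int) + 1) 1 ++ [((i : Nat) : Int) + 1] := by
      push_cast
      exact PySem.List.pyRange_one_succ_right (by omega)
    rw [hsplit, List.foldl_append]
    set J : Int := ((i : Nat) : Int) + 1 with hJ
    set dpPrev := (PySem.List.pyRange 1 (((i : Nat) : Int) + 1) 1).foldl
        (fun dp j =>
          dp ++ [lens.any (fun l =>
            decide (l ≤ j) &&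
              (PySem.List.pyGetD dp (j - l) false || decide (l = j)) &&
              decide (PySem.Str.slice d (some (j - l)) (some j) ∈ ts))])
        [false] with hdpPrev
    simp only [List.foldl_cons, List.foldl_nil]
    have hlen1 : (dpPrev ++ [lens.any (fun l =>
        decide (l ≤ J) &&
          (PySem.List.pyGetD dpPrev (J - l) false || decide (l = J)) &&
          decide (PySem.Str.slice d (some (J - l)) (some J) ∈ ts))]).length = i + 1 + 1 := by
      simp [hlenP]
    refine ⟨hlen1, ?_⟩
    intro k hk
    by_cases hki : k ≤ i
    · rw [List.getD_append _ _ _ _ (by omega)]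
      exact hdpP k hki
    · have hk1 : k = i + 1 := by omega
      subst hk1
      rw [List.getD_append_right _ _ _ _ (by omega)]
      have hone : (i + 1) - dpPrev.length = 0 := by omega
      rw [hone]
      simp only [List.getD, List.getElem?_cons_zero, Option.getD_some]
      rw [List.any_eq_true]
      constructor
      · rintro ⟨l, hl, hcond⟩
        simp only [Bool.and_eq_true, Bool.or_eq_true, decide_eq_true_eq] at hcond
        obtain ⟨⟨hlle, hdp⟩, hslice⟩ := hcond
        obtain ⟨t, htmem, htne, htlen⟩ := (hlens l).mp hl
        have hl1 : 1 ≤ l := by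
          have := one_le_len_of_ne_empty htne
          omega
        set k' : Nat := (J - l).toNat with hk'
        have hJl : J - l = (k' : Int) := by omega
        have hJr : J = (J - l) + l := by omega
        have hp : (PySem.Str.slice d (some (J - l)) (some J)).toList =
            (d.toList.drop k').take l.toNat := by
          rw [slice_toList' d (J - l) J (by omega) (by omega), hJl]
          congr 2
          omega
        have hplen : ((d.toList.drop k').take l.toNat).length = l.toNat := by
          rw [List.length_take, List.length_drop]
          omega
        have hpne : PySem.Str.slice d (some (J - l)) (some J) ≠ "" := by
          intro he
          rw [he] at hp
          have := congrArg List.length hp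
          rw [hplen] at this
          simp at this
          omega
        have hcomp_p : CompPos ts ((d.toList.drop k').take l.toNat) := by
          rw [← hp]
          exact compPos_single hslice hpne
        have htake : d.toList.take (i + 1) = d.toList.take k' ++ (d.toList.drop k').take l.toNat := by
          have : i + 1 = k' + l.toNat := by omega
          rw [this, List.take_add]
        rcases hdp with hdp | hleq
        · have hk'i : k' ≤ i := by omega
          rw [hJl, PySem.List.pyGetD_natCast] at hdp
          have hcomp_pre := (hdpP k' hk'i).mp hdp
          rw [htake]
          exact compPos_append hcomp_pre hcomp_p
        · have hk'0 : k' = 0 := by omega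
          rw [hk'0] at hcomp_p htake
          rw [htake]
          simpa using hcomp_p
      · intro hcomp
        obtain ⟨parts, hne, hmem, hfl⟩ := hcomp
        rcases List.eq_nil_or_concat parts with rfl | ⟨ps, p, rfl⟩
        · exact absurd rfl hne
        obtain ⟨hpmem, hpne⟩ := hmem p (by simp)
        have hfl' : ((ps.map String.toList).flatten) ++ p.toList = d.toList.take (i + 1) := by
          simpa [List.concat_eq_append] using hfl
        have htklen : (d.toList.take (i + 1)).length = i + 1 := by
          rw [List.length_take]
          omega
        have hplen0 : 0 < p.toList.length :=
          List.length_pos_of_ne_nil (toList_ne_nil_of_ne_empty hpne)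
        have hsum : ((ps.map String.toList).flatten).length + p.toList.length = i + 1 := by
          have := congrArg List.length hfl'
          rw [htklen] at this
          simpa using this
        set A := (ps.map String.toList).flatten with hA
        set l : Int := PySem.Str.len p with hldef
        have hlval : l = (p.toList.length : Int) := PySem.Str.len_eq p
        refine ⟨l, (hlens l).mpr ⟨p, hpmem, hpne, rfl⟩, ?_⟩
        simp only [Bool.and_eq_true, Bool.or_eq_true, decide_eq_true_eq]
        have hlle : l ≤ J := by omega
        have hk'A : (J - l).toNat = A.length := by omega
        have hsliceList : (PySem.Str.slice d (some (J - l)) (some J)).toList = p.toList := by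
          rw [slice_toList' d (J - l) J (by omega) (by omega), hk'A]
          have h1 : (J - (J - l)).toNat = (i + 1) - A.length := by omega
          rw [h1, ← List.drop_take, ← hfl', List.drop_left]
        have hslice : PySem.Str.slice d (some (J - l)) (some J) ∈ ts := by
          have : PySem.Str.slice d (some (J - l)) (some J) = p :=
            String.toList_inj.mp hsliceList
          rw [this]
          exact hpmem
        refine ⟨⟨hlle, ?_⟩, hslice⟩
        rcases List.eq_nil_or_concat ps with rfl | hpsne
        · right
          have : A.length = 0 := by simp [hA]
          omega
        · left
          have hApos : ps ≠ [] := by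
            rcases hpsne with ⟨_, _, rfl⟩
            simp
          have hAk : A = d.toList.take A.length := by
            conv_lhs => rw [← List.take_left (l₁ := A) (l₂ := p.toList)]
            rw [hfl', List.take_take]
            congr 1
            omega
          have hAle : A.length ≤ i := by omega
          rw [show J - l = ((A.length : Nat) : Int) by omega, PySem.List.pyGetD_natCast]
          refine (hdpP A.length hAle).mpr ?_
          refine ⟨ps, hApos, fun q hq => hmem q (by simp [hq]), ?_⟩
          rw [← hAk]

theorem bool_eq_of_iff {P : Prop} {a b : Bool} (h1 : a = true ↔ P) (h2 : b = true ↔ P) :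
    a = b := by
  cases a <;> cases b <;> simp_all

theorem fold_eq (towels : List String) :
    ∀ (ds : List String) (k : Int) (T : List String), TInv (PySem.Set.ofList towels) T →
    (ds.foldl (fun (st : Int × List String) d =>
        ((st.1 + (if (pvDesignLoop d ((PySem.Str.len d).toNat + 1) st.2
            (PySem.Set.ofList [(0 : Int)])).1 then 1 else 0)),
         (pvDesignLoop d ((PySem.Str.len d).toNat + 1) st.2 (PySem.Set.ofList [(0 : Int)])).2))
      (k, T)).1
    = ds.foldl (fun count d =>
        count + (if PySem.List.pyGetD
          ((PySem.List.pyRange 1 (PySem.Str.len d + 1) 1).foldl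
            (fun dp i =>
              dp ++ [(PySem.Set.ofList
                  (((PySem.Set.ofList towels).filter (fun t => decide (t ≠ ""))).map
                    PySem.Str.len)).any (fun l =>
                decide (l ≤ i) &&
                  (PySem.List.pyGetD dp (i - l) false || decide (l = i)) &&
                  decide (PySem.Str.slice d (some (i - l)) (some i) ∈ PySem.Set.ofList towels))])
            [false])
          (PySem.Str.len d) false then 1 else 0)) k := by
  have hlens : ∀ l : Int,
      l ∈ PySem.Set.ofList (((PySem.Set.ofList towels).filter (fun t => decide (t ≠ ""))).map
        PySem.Str.len) ↔
      ∃ t ∈ PySem.Set.ofList towels, t ≠ "" ∧ PySem.Str.len t = l := by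
    intro l
    rw [PySem.Set.mem_ofList]
    constructor
    · intro h
      obtain ⟨t, ht, rfl⟩ := List.mem_map.mp h
      have := List.mem_filter.mp ht
      exact ⟨t, this.1, by simpa using this.2, rfl⟩
    · rintro ⟨t, ht, htne, rfl⟩
      exact List.mem_map.mpr ⟨t, List.mem_filter.mpr ⟨ht, by simpa⟩, rfl⟩
  intro ds
  induction ds with
  | nil => intro k T _; rfl
  | cons d ds ih =>
    intro k T hT
    simp only [List.foldl_cons]
    have hlend : PySem.Str.len d = (d.toList.length : Int) := PySem.Str.len_eq d
    have hnn : PySem.Str.len d = (((PySem.Str.len d).toNat : Nat) : Int) := by omega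
    obtain ⟨hTnext, hiff⟩ := design_spec (T0 := PySem.Set.ofList towels) (T := T) d hT
    obtain ⟨_, hdp⟩ := dp_spec (PySem.Set.ofList towels) _ hlens d (PySem.Str.len d).toNat
      (by omega)
    have hflag : (PySem.List.pyGetD
        ((PySem.List.pyRange 1 (PySem.Str.len d + 1) 1).foldl
          (fun dp i =>
            dp ++ [(PySem.Set.ofList
                (((PySem.Set.ofList towels).filter (fun t => decide (t ≠ ""))).map
                  PySem.Str.len)).any (fun l =>
              decide (l ≤ i) &&
                (PySem.List.pyGetD dp (i - l) false || decide (l = i)) &&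
                decide (PySem.Str.slice d (some (i - l)) (some i) ∈ PySem.Set.ofList towels))])
          [false])
        (PySem.Str.len d) false = true) ↔ CompPos (PySem.Set.ofList towels) d.toList := by
      rw [hnn, PySem.List.pyGetD_natCast,
        show ((PySem.Str.len d).toNat : Nat) = d.toList.length by omega]
      have := hdp (PySem.Str.len d).toNat le_rfl
      rw [show ((PySem.Str.len d).toNat : Nat) = d.toList.length by omega, List.take_length]
        at this
      exact this
    have hbool := bool_eq_of_iff hiff hflag
    rw [hbool]
    exact ih _ _ hTnext

-- ===== VERDICT (by name: the statement is the Claim_ definition above) =====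
theorem part1_spec : Claim_equal_part1 := by
  intro towels designs _ _
  unfold Spec_part1 part1 part1_alt
  have hInv0 : TInv (PySem.Set.ofList towels) (PySem.Set.ofList towels) :=
    ⟨fun t ht => ht, fun t ht => by
      by_cases h : t = ""
      · exact Or.inl h
      · exact Or.inr (compPos_single ht h)⟩
  exact fold_eq towels designs 0 (PySem.Set.ofList towels) hInv0
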